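-- pv_equiv track=rewrite | github.com/sailendraprasath/Puthon_DEC31 | Jul17/demo.py | long_subset
-- ===== SOURCE A (Python) =====
-- def long_subset(arr):
--     result = []
--     unique_val = set(arr)
--
--     for num in unique_val:
--         subset = []
--
--         for x in arr:
--             if x == num or x == num+2:
--                 subset.append(x)
--         if len(subset) > len(result):
--             result = subset
--     return result
-- ===== SOURCE B (Python) =====
-- def long_subset(arr):
--     if not arr:
--         return []
--     cnt = {}
--     for x in arr:
--         cnt[x] = cnt.get(x, 0) + 1
--     best = max(cnt, key=lambda v: cnt[v] + cnt.get(v + 2, 0))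
--     return [x for x in arr if x == best or x == best + 2]
-- ===== Notes on version B (the rewrite author's own statement) =====
-- stated objective: faster
-- what changed: Replaces the per-unique-value rescans of the whole array (build a candidate subset for every distinct value) with one counting pass into a dict, a single max over the counted keys, and one filter pass to build the winning subset.
-- outside the precondition, e.g. on long_subset([5, 0]): A returns [0], B returns [5]
import Mathlib
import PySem

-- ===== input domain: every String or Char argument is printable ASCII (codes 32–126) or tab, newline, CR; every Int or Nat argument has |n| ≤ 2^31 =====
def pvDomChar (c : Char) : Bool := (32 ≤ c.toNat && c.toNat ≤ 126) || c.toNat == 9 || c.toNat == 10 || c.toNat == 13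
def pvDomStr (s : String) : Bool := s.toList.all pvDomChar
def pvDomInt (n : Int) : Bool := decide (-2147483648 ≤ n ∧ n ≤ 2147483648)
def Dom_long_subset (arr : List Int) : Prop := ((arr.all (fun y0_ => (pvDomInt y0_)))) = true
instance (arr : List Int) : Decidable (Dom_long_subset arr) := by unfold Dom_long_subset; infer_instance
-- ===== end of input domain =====

-- B counts every value once into a dict, picks the best value by a single max, and builds the
-- winning subset in one filter pass, instead of A's rescan of the whole array per distinct value.


-- ===== PORT A =====
def long_subset (arr : List Int) : List Int :=
  let unique_val := PySem.Set.ofList arr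
  unique_val.foldl (fun result num =>
    let subset := arr.foldl (fun s x => if x == num || x == num + 2 then s ++ [x] else s) []
    if subset.length > result.length then subset else result) []

-- ===== PORT B =====
def long_subset_alt (arr : List Int) : List Int :=
  if arr = [] then []
  else
    let cnt : PySem.Dict Int Int := arr.foldl (fun d x => d.insert x (d.getD x 0 + 1)) PySem.Dict.empty
    let best? := PySem.List.max? cnt.keys (fun v => cnt.getD v 0 + cnt.getD (v + 2) 0)
    -- the 'none' branch is a totality guard only: cnt is nonempty when arr is nonempty
    best?.elim [] (fun best => arr.filter (fun x => x == best || x == best + 2))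

-- ===== PRECONDITION & SPEC =====
-- combined count of v and v+2 in arr: the length of the candidate subset for v
def pvKey (arr : List Int) (v : Int) : Int := ((List.count v arr : Int)) + ((List.count (v + 2) arr : Int))

-- Pre_ excludes arrays in which the maximal combined count (count of v plus count of v+2) is
-- attained by more than one distinct value: there A's answer depends on Python's set iteration
-- order (and B's on dict insertion order), an accidental tie-break no one would specify.
def Pre_long_subset (arr : List Int) : Prop :=
  ((PySem.Set.ofList arr).filter
      (fun v => (PySem.Set.ofList arr).all
        (fun w => decide (pvKey arr w ≤ pvKey arr v)))).length ≤ 1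
instance (arr : List Int) : Decidable (Pre_long_subset arr) := by unfold Pre_long_subset; infer_instance

def pvWitness_long_subset : List Int := [1, 1, 3]

def Spec_long_subset (arr : List Int) (out : List Int) : Prop := out = long_subset_alt arr
instance (arr : List Int) (out : List Int) : Decidable (Spec_long_subset arr out) := by unfold Spec_long_subset; infer_instance

-- ===== CLAIM (what is proved, stated in full; the proofs are below) =====
def Claim_equal_long_subset : Prop := ∀ (arr : List Int), Dom_long_subset arr → Pre_long_subset arr → Spec_long_subset arr (long_subset arr)

-- ===== LEMMAS AND PROOFS =====

-- the candidate subset for value v, shared shape of both ports' results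
def pvF (arr : List Int) (v : Int) : List Int := arr.filter (fun x => x == v || x == v + 2)

theorem pvF_length (arr : List Int) (v : Int) :
    ((pvF arr v).length : Int) = pvKey arr v := by
  induction arr with
  | nil => simp [pvF, pvKey]
  | cons x t ih =>
    have hne : v ≠ v + 2 := by omega
    simp only [pvF, pvKey, List.filter_cons, List.count_cons] at *
    by_cases h1 : x = v
    · simp [h1, hne]
      omega
    · by_cases h2 : x = v + 2
      · simp [h2]
        omega
      · simp [h1, h2]
        omega

theorem pv_two_le {α : Type} {a b : α} {l : List α} (ha : a ∈ l) (hb : b ∈ l) (hne : a ≠ b) :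
    2 ≤ l.length := by
  match l with
  | [] => simp at ha
  | [x] =>
    simp at ha hb
    exact absurd (ha.trans hb.symm) hne
  | x :: y :: t => simp

-- the strict-improvement fold keeps acc once nothing beats it
theorem pv_fold_const (arr : List Int) (l : List Int) (acc : List Int)
    (h : ∀ v ∈ l, (pvF arr v).length ≤ acc.length) :
    l.foldl (fun r num => if (pvF arr num).length > r.length then pvF arr num else r) acc = acc := by
  induction l with
  | nil => rfl
  | cons x t ih =>
    have hx := h x (by simp)
    simp only [List.foldl_cons, gt_iff_lt, if_neg (by omega : ¬ acc.length < (pvF arr x).length)]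
    exact ih (fun v hv => h v (by simp [hv]))

-- with a strictly dominant m in l, the fold returns m's subset
theorem pv_fold_main (arr : List Int) (l : List Int) (m : Int) (acc : List Int)
    (hm : m ∈ l)
    (hacc : acc.length < (pvF arr m).length)
    (hstr : ∀ v ∈ l, v ≠ m → (pvF arr v).length < (pvF arr m).length) :
    l.foldl (fun r num => if (pvF arr num).length > r.length then pvF arr num else r) acc
      = pvF arr m := by
  induction l generalizing acc with
  | nil => simp at hm
  | cons x t ih =>
    by_cases hx : x = m
    · subst hx
      simp only [List.foldl_cons, gt_iff_lt, if_pos hacc]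
      exact pv_fold_const arr t (pvF arr x)
        (fun v hv => by
          by_cases hvx : v = x
          · simp [hvx]
          · exact le_of_lt (hstr v (List.mem_cons_of_mem _ hv) hvx))
    · have hmt : m ∈ t := by
        rcases List.mem_cons.mp hm with h | h
        · exact absurd h.symm hx
        · exact h
      simp only [List.foldl_cons, gt_iff_lt]
      split_ifs with hcond
      · exact ih (pvF arr x) hmt (hstr x List.mem_cons_self hx)
          (fun v hv hvm => hstr v (List.mem_cons_of_mem _ hv) hvm)
      · exact ih acc hmt hacc (fun v hv hvm => hstr v (List.mem_cons_of_mem _ hv) hvm)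

theorem pv_portA (arr : List Int) :
    long_subset arr
      = (PySem.Set.ofList arr).foldl
          (fun r num => if (pvF arr num).length > r.length then pvF arr num else r) [] := by
  unfold long_subset pvF
  simp only [PySem.List.foldl_append_if_eq_filter, List.nil_append]

theorem pv_portB (arr : List Int) (hne : arr ≠ []) :
    long_subset_alt arr
      = (PySem.List.max? (PySem.Set.ofList arr) (pvKey arr)).elim [] (fun best => pvF arr best) := by
  unfold long_subset_alt pvF pvKey
  rw [if_neg hne]
  simp only [PySem.Dict.foldl_insert_getD_add_one_eq_counter, PySem.Dict.keys_counter,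
    PySem.Dict.getD_counter]

-- ===== VERDICT (by name: the statement is the Claim_ definition above) =====
theorem long_subset_spec : Claim_equal_long_subset := by
  intro arr _ hpre
  unfold Spec_long_subset
  by_cases hne : arr = []
  · subst hne; rfl
  · rw [pv_portA, pv_portB arr hne]
    have hset : PySem.Set.ofList arr ≠ [] := by
      rcases List.exists_mem_of_ne_nil arr hne with ⟨x, hx⟩
      have : x ∈ PySem.Set.ofList arr := (PySem.Set.mem_ofList _ _).mpr hx
      intro h; rw [h] at this; simp at this
    obtain ⟨m, hmax⟩ : ∃ m, PySem.List.max? (PySem.Set.ofList arr) (pvKey arr) = some m := by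
      cases h : PySem.List.max? (PySem.Set.ofList arr) (pvKey arr) with
      | none => exact absurd ((PySem.List.max?_eq_none_iff _ _).mp h) hset
      | some m => exact ⟨m, rfl⟩
    rw [hmax]
    have hmem : m ∈ PySem.Set.ofList arr := PySem.List.max?_mem hmax
    have hismax : ∀ y ∈ PySem.Set.ofList arr, pvKey arr y ≤ pvKey arr m :=
      PySem.List.max?_isMax hmax
    have hstr : ∀ v ∈ PySem.Set.ofList arr, v ≠ m →
        (pvF arr v).length < (pvF arr m).length := by
      intro v hv hvm
      by_contra hle
      rw [not_lt] at hle
      have hkey : pvKey arr m ≤ pvKey arr v := by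
        rw [← pvF_length, ← pvF_length]; exact_mod_cast hle
      have hvmax : ∀ y ∈ PySem.Set.ofList arr, pvKey arr y ≤ pvKey arr v :=
        fun y hy => le_trans (hismax y hy) hkey
      have hmf : m ∈ (PySem.Set.ofList arr).filter
          (fun v => (PySem.Set.ofList arr).all (fun w => decide (pvKey arr w ≤ pvKey arr v))) := by
        rw [List.mem_filter]
        refine ⟨hmem, ?_⟩
        simp only [List.all_eq_true]
        intro w hw; simpa using hismax w hw
      have hvf : v ∈ (PySem.Set.ofList arr).filter
          (fun v => (PySem.Set.ofList arr).all (fun w => decide (pvKey arr w ≤ pvKey arr v))) := by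
        rw [List.mem_filter]
        refine ⟨hv, ?_⟩
        simp only [List.all_eq_true]
        intro w hw; simpa using hvmax w hw
      have := pv_two_le hvf hmf hvm
      unfold Pre_long_subset at hpre
      omega
    have hpos : 0 < (pvF arr m).length := by
      have hmarr : m ∈ arr := (PySem.Set.mem_ofList _ _).mp hmem
      have : m ∈ pvF arr m := by
        unfold pvF
        rw [List.mem_filter]
        exact ⟨hmarr, by simp⟩
      exact List.length_pos_of_mem this
    exact pv_fold_main arr (PySem.Set.ofList arr) m [] hmem (by simpa using hpos) hstr
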